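-- pv_equiv track=rewrite | github.com/matichorvat/hsst | hsst/rulextraction/rule_type.py | is_basic_verb
-- ===== SOURCE A (Python) =====
-- def get_node_pos(node):
--     if len(node.split('_')) >= 3:
--         return node.split('_')[2]
--     else:
--         return ''
--
-- def is_nonterminal(node):
--     return node.startswith('X')
--
-- def is_verb(node):
--     return get_node_pos(node) == 'v'
--
-- def is_basic_verb(nodes, edges):
--
--     verb_index = None
--     for index, node in enumerate(nodes):
--         if is_verb(node) and verb_index is None:
--             verb_index = str(index)
--
--         elif not is_nonterminal(node):
--             return False
--
--     if verb_index is None: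
--         return False
--
--     return True
-- ===== SOURCE B (Python) =====
-- def get_node_pos(node):
--     if len(node.split('_')) >= 3:
--         return node.split('_')[2]
--     else:
--         return ''
--
-- def is_nonterminal(node):
--     return node.startswith('X')
--
-- def is_verb(node):
--     return get_node_pos(node) == 'v'
--
-- def is_basic_verb(nodes, edges):
--     verb_indices = [i for i, n in enumerate(nodes) if is_verb(n)]
--     if not verb_indices:
--         return False
--     first = verb_indices[0]
--     return all(i == first or is_nonterminal(n) for i, n in enumerate(nodes))
-- ===== Notes on version B (the rewrite author's own statement) =====
-- stated objective: simpler
-- what changed: Replaces A's single interleaved loop that threads a verb_index sentinel (with early returns) by two independent passes: collect verb indices, then validate every non-first-verb node with all().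
import Mathlib
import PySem

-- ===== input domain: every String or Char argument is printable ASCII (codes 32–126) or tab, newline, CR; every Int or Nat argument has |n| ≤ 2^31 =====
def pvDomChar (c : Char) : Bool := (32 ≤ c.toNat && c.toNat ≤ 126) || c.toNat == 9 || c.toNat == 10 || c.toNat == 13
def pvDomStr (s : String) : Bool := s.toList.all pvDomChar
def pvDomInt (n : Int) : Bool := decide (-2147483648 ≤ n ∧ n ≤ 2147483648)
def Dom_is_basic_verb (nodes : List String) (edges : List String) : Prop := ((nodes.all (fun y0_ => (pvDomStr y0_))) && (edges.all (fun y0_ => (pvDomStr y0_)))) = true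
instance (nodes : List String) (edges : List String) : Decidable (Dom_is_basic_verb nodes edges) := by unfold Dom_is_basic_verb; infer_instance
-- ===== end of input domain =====

-- B separates locating the first verb from validating the other nodes (two passes, no threaded sentinel); same return value, simpler decomposition.


-- ===== PORT A =====
def pvGetNodePos (node : String) : String :=
  -- node.split('_'): sep "_" is nonempty, so split? is always some (exact)
  if 3 ≤ ((PySem.Str.split? node "_").getD []).length then ((PySem.Str.split? node "_").getD []).getD 2 "" else ""

def pvIsNonterminal (node : String) : Bool := PySem.Str.startswith node "X"

def pvIsVerb (node : String) : Bool := pvGetNodePos node == "v"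

-- A's loop: verb_index sentinel threaded through the enumerate pass, early return on a bad node
def pvGoA : List (Int × String) → Option String → Bool
  | [], verbIndex => verbIndex.isSome
  | (index, node) :: rest, verbIndex =>
    if pvIsVerb node && verbIndex.isNone then pvGoA rest (some (PySem.Int.toStr index))
    else if !pvIsNonterminal node then false
    else pvGoA rest verbIndex

def is_basic_verb (nodes : List String) (_edges : List String) : Bool :=
  pvGoA (PySem.List.enumerate nodes) none

-- ===== PORT B =====
def is_basic_verb_alt (nodes : List String) (_edges : List String) : Bool :=
  let verbIndices := ((PySem.List.enumerate nodes).filter (fun p => pvIsVerb p.2)).map (·.1)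
  match verbIndices with
  | [] => false
  | first :: _ => (PySem.List.enumerate nodes).all (fun p => p.1 == first || pvIsNonterminal p.2)

-- ===== PRECONDITION & SPEC =====
def Spec_is_basic_verb (nodes : List String) (edges : List String) (out : Bool) : Prop := out = is_basic_verb_alt nodes edges
instance (nodes : List String) (edges : List String) (out : Bool) : Decidable (Spec_is_basic_verb nodes edges out) := by unfold Spec_is_basic_verb; infer_instance

-- ===== CLAIM (what is proved, stated in full; the proofs are below) =====
def Claim_equal_is_basic_verb : Prop := ∀ (nodes : List String) (edges : List String), Dom_is_basic_verb nodes edges → Spec_is_basic_verb nodes edges (is_basic_verb nodes edges)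

-- ===== LEMMAS AND PROOFS =====


lemma pvGoA_some (l : List (Int × String)) (s : String) :
    pvGoA l (some s) = l.all (fun p => pvIsNonterminal p.2) := by
  induction l with
  | nil => rfl
  | cons p rest ih =>
    obtain ⟨i, n⟩ := p
    by_cases hn : pvIsNonterminal n = true <;> simp [pvGoA, hn, ih]

lemma pvGoA_none (l : List (Int × String)) (hd : l.Pairwise (fun p q => p.1 ≠ q.1)) :
    pvGoA l none =
      (match (l.filter (fun p => pvIsVerb p.2)).map (·.1) with
       | [] => false
       | first :: _ => l.all (fun p => p.1 == first || pvIsNonterminal p.2)) := by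
  induction l with
  | nil => rfl
  | cons p rest ih =>
    obtain ⟨i, n⟩ := p
    rw [List.pairwise_cons] at hd
    obtain ⟨hne, hrest⟩ := hd
    by_cases hv : pvIsVerb n = true
    · have hrw : rest.all (fun p => p.1 == i || pvIsNonterminal p.2)
          = rest.all (fun p => pvIsNonterminal p.2) := by
        rw [Bool.eq_iff_iff]
        simp only [List.all_eq_true]
        constructor
        · intro h q hq
          have := h q hq
          rcases Bool.or_eq_true_iff.mp this with h1 | h1
          · exact absurd (beq_iff_eq.mp h1) (hne q hq).symm
          · exact h1
        · intro h q hq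
          exact Bool.or_eq_true_iff.mpr (Or.inr (h q hq))
      simp [pvGoA, hv, pvGoA_some, hrw]
    · by_cases hn : pvIsNonterminal n = true
      · have hA : pvGoA ((i, n) :: rest) none = pvGoA rest none := by
          simp [pvGoA, hv, hn]
        rw [hA, ih hrest]
        simp only [List.filter_cons, hv, Bool.false_eq_true, reduceIte]
        cases hfl : (rest.filter (fun p => pvIsVerb p.2)).map (·.1) with
        | nil => rfl
        | cons first tl => simp [hn]
      · have hA : pvGoA ((i, n) :: rest) none = false := by
          simp [pvGoA, hv, hn]
        rw [hA]
        simp only [List.filter_cons, hv, Bool.false_eq_true, reduceIte]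
        cases hfl : (rest.filter (fun p => pvIsVerb p.2)).map (·.1) with
        | nil => rfl
        | cons first tl =>
          have hmem : ∃ q ∈ rest, q.1 = first := by
            have : first ∈ (rest.filter (fun p => pvIsVerb p.2)).map (·.1) := by
              rw [hfl]; exact List.mem_cons_self
            obtain ⟨q, hq, hq1⟩ := List.mem_map.mp this
            exact ⟨q, List.mem_of_mem_filter hq, hq1⟩
          obtain ⟨q, hq, hq1⟩ := hmem
          have hif : (i == first) = false := by
            rw [beq_eq_false_iff_ne]
            exact fun h => (hne q hq) (h.trans hq1.symm)
          simp [hif, hn]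

-- ===== VERDICT (by name: the statement is the Claim_ definition above) =====
theorem is_basic_verb_spec : Claim_equal_is_basic_verb := by
  intro nodes edges _
  unfold Spec_is_basic_verb is_basic_verb is_basic_verb_alt
  exact pvGoA_none _ ((PySem.List.pairwise_lt_enumerate nodes 0).imp (fun h => ne_of_lt h))
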